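-- pv_equiv track=rewrite | github.com/ShawnDong98/Algorithm-Book | huawei/18. 分配土地.py | func
-- ===== SOURCE A (Python) =====
-- def func(n, m, maze):
--     boundaries = {}
--     for i in range(n):
--         for j in range(m):
--             if maze[i][j] != 0:
--                 if maze[i][j] not in boundaries:
--                     boundaries[maze[i][j]] = [i, j, i, j]
--                 else:
--                     boundaries[maze[i][j]][0] = min(boundaries[maze[i][j]][0], i)
--                     boundaries[maze[i][j]][1] = min(boundaries[maze[i][j]][1], j)
--                     boundaries[maze[i][j]][2] = max(boundaries[maze[i][j]][2], i)
--                     boundaries[maze[i][j]][3] = max(boundaries[maze[i][j]][3], j)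
--
--     max_area = 0
--     for k, v in boundaries.items():
--         left, top, right, bottom = v
--         area = (right - left + 1) * (bottom - top + 1)
--         if area > max_area:
--             max_area = area
--
--     return max_area
-- ===== SOURCE B (Python) =====
-- def func(n, m, maze):
--     # Pass 1: collect the distinct nonzero labels in first-occurrence order.
--     labels = []
--     seen = set()
--     for i in range(n):
--         for j in range(m):
--             v = maze[i][j]
--             if v != 0 and v not in seen:
--                 seen.add(v)
--                 labels.append(v)
--     # Pass 2: for each label, rescan the whole grid to project its cells onto
--     # the row and column axes, and take the extents of those projections.
--     best = 0
--     for v in labels: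
--         rows = [i for i in range(n) for j in range(m) if maze[i][j] == v]
--         cols = [j for i in range(n) for j in range(m) if maze[i][j] == v]
--         area = (max(rows) - min(rows) + 1) * (max(cols) - min(cols) + 1)
--         if area > best:
--             best = area
--     return best
-- ===== Notes on version B (the rewrite author's own statement) =====
-- stated objective: alternative
-- what changed: B drops A's dict of evolving bounding-box 4-tuples entirely: a first pass only collects the distinct nonzero labels in order, then for each label B rescans the whole grid with comprehensions projecting that label's cells onto the row and column axes and takes the extents of those projections (naive per-label rescan instead of a hash index built in one pass); Pre_ excludes only inputs where both programs raise IndexError.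
import Mathlib
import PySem

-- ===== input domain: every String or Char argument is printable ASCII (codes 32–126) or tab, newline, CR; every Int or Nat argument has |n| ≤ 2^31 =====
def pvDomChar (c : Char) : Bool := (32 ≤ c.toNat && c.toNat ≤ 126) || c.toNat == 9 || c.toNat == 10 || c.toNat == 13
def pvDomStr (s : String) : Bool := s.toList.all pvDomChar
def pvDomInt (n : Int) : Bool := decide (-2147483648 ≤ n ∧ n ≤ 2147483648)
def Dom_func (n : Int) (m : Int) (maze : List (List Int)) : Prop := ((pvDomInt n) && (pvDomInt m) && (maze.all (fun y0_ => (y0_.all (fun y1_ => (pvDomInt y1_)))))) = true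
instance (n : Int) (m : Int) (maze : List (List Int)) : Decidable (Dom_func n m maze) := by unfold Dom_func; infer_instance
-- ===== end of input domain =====

-- B drops A's dict of evolving bounding boxes: it first collects the distinct nonzero
-- labels, then rescans the whole grid per label, projecting that label's cells onto the
-- row and column axes and taking the extents of the projections (objective: alternative).

-- ===== PORT A =====
-- maze[i][j]; the `.getD` defaults are never reached inside Pre_func (Python raises there)
def pvCell (maze : List (List Int)) (i j : Int) : Int :=
  (PySem.List.pyGet? ((PySem.List.pyGet? maze i).getD []) j).getD 0

def func (n : Int) (m : Int) (maze : List (List Int)) : Int :=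
  let boundaries : PySem.Dict Int (Int × Int × Int × Int) :=
    (PySem.List.pyRange 0 n 1).foldl (fun d i =>
      (PySem.List.pyRange 0 m 1).foldl (fun d j =>
        let v := pvCell maze i j
        if v ≠ 0 then
          if d.contains v then
            match d.get? v with
            | some q => d.insert v (min q.1 i, min q.2.1 j, max q.2.2.1 i, max q.2.2.2 j)
            | none => d
          else d.insert v (i, j, i, j)
        else d) d) PySem.Dict.empty
  boundaries.items.foldl (fun ma p =>
    let area := (p.2.2.2.1 - p.2.1 + 1) * (p.2.2.2.2 - p.2.2.1 + 1)
    if area > ma then area else ma) 0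

-- ===== PORT B =====
-- max(xs) / min(xs) on a nonempty Python list of ints (B only applies them to nonempty lists)
def pyMax (xs : List Int) : Int := match xs with | [] => 0 | x :: t => t.foldl max x
def pyMin (xs : List Int) : Int := match xs with | [] => 0 | x :: t => t.foldl min x

def func_alt (n : Int) (m : Int) (maze : List (List Int)) : Int :=
  -- pass 1: distinct nonzero labels, first-occurrence order (seen : set, labels : list)
  let sl : PySem.Set Int × List Int :=
    (PySem.List.pyRange 0 n 1).foldl (fun sl i =>
      (PySem.List.pyRange 0 m 1).foldl (fun sl j =>
        let v := pvCell maze i j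
        if v ≠ 0 ∧ ¬ PySem.Set.contains sl.1 v then (PySem.Set.add sl.1 v, sl.2 ++ [v])
        else sl) sl) (PySem.Set.empty, [])
  -- pass 2: per label, rescan the grid projecting its cells onto each axis
  sl.2.foldl (fun best v =>
    let rows := (PySem.List.pyRange 0 n 1).flatMap (fun i =>
      ((PySem.List.pyRange 0 m 1).filter (fun j => pvCell maze i j == v)).map (fun _ => i))
    let cols := (PySem.List.pyRange 0 n 1).flatMap (fun i =>
      (PySem.List.pyRange 0 m 1).filter (fun j => pvCell maze i j == v))
    let area := (pyMax rows - pyMin rows + 1) * (pyMax cols - pyMin cols + 1)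
    if area > best then area else best) 0

-- ===== PRECONDITION & SPEC =====
-- Pre_ excludes exactly the inputs where Python A raises IndexError: a scan (m > 0) that
-- reaches a missing row (n > len(maze)) or a scanned row shorter than m.
def Pre_func (n : Int) (m : Int) (maze : List (List Int)) : Prop :=
  m ≤ 0 ∨ (n ≤ (maze.length : Int) ∧ ∀ row ∈ maze.take n.toNat, m ≤ (row.length : Int))
instance (n : Int) (m : Int) (maze : List (List Int)) : Decidable (Pre_func n m maze) := by unfold Pre_func; infer_instance
def pvWitness_func : Int × Int × List (List Int) := (2, 2, [[1, 1], [0, 2]])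
def Spec_func (n : Int) (m : Int) (maze : List (List Int)) (out : Int) : Prop := out = func_alt n m maze
instance (n : Int) (m : Int) (maze : List (List Int)) (out : Int) : Decidable (Spec_func n m maze out) := by unfold Spec_func; infer_instance

-- ===== CLAIM (what is proved, stated in full; the proofs are below) =====
def Claim_equal_func : Prop := ∀ (n : Int) (m : Int) (maze : List (List Int)), Dom_func n m maze → Pre_func n m maze → Spec_func n m maze (func n m maze)

-- ===== LEMMAS AND PROOFS =====

def pvCells (n m : Int) (maze : List (List Int)) : List (Int × Int × Int) :=
  (PySem.List.pyRange 0 n 1).flatMap (fun i =>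
    (PySem.List.pyRange 0 m 1).map (fun j => (pvCell maze i j, i, j)))

def pvNz (n m : Int) (maze : List (List Int)) : List (Int × Int × Int) :=
  (pvCells n m maze).filter (fun c => decide (c.1 ≠ 0))

def pvU (o : Option (Int × Int × Int × Int)) (i j : Int) : Int × Int × Int × Int :=
  match o with
  | none => (i, j, i, j)
  | some q => (min q.1 i, min q.2.1 j, max q.2.2.1 i, max q.2.2.2 j)

def pvStepA (d : PySem.Dict Int (Int × Int × Int × Int)) (c : Int × Int × Int) :
    PySem.Dict Int (Int × Int × Int × Int) :=
  d.insert c.1 (pvU (d.get? c.1) c.2.1 c.2.2)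

lemma stepA_branches (d : PySem.Dict Int (Int × Int × Int × Int)) (v i j : Int) :
    (if d.contains v then
      match d.get? v with
      | some q => d.insert v (min q.1 i, min q.2.1 j, max q.2.2.1 i, max q.2.2.2 j)
      | none => d
     else d.insert v (i, j, i, j)) = d.insert v (pvU (d.get? v) i j) := by
  rw [PySem.Dict.contains_eq_isSome_get?]
  cases h : d.get? v <;> simp [pvU]

lemma dictA_eq (n m : Int) (maze : List (List Int)) :
    ((PySem.List.pyRange 0 n 1).foldl (fun d i =>
      (PySem.List.pyRange 0 m 1).foldl (fun d j =>
        let v := pvCell maze i j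
        if v ≠ 0 then
          if d.contains v then
            match d.get? v with
            | some q => d.insert v (min q.1 i, min q.2.1 j, max q.2.2.1 i, max q.2.2.2 j)
            | none => d
          else d.insert v (i, j, i, j)
        else d) d) PySem.Dict.empty) = (pvNz n m maze).foldl pvStepA PySem.Dict.empty := by
  rw [pvNz, List.foldl_filter, pvCells, List.foldl_flatMap]
  simp only [List.foldl_map, decide_eq_true_eq, stepA_branches, pvStepA]

lemma get?_foldl_stepA (l : List (Int × Int × Int)) (d : PySem.Dict Int (Int × Int × Int × Int)) (k : Int) :
    (l.foldl pvStepA d).get? k =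
      (l.filter (fun c => c.1 == k)).foldl (fun o c => some (pvU o c.2.1 c.2.2)) (d.get? k) := by
  induction l generalizing d with
  | nil => rfl
  | cons c t ih =>
    by_cases h : c.1 = k
    · subst h
      simp [ih, pvStepA, PySem.Dict.get?_insert_self]
    · simp [ih, pvStepA, h, PySem.Dict.get?_insert_of_ne _ _ (Ne.symm h)]

lemma quad_foldl (t : List (Int × Int × Int)) (a b c d : Int) :
    t.foldl (fun o x => some (pvU o x.2.1 x.2.2)) (some (a, b, c, d)) =
      some ((t.map (·.2.1)).foldl min a, (t.map (·.2.2)).foldl min b,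
            (t.map (·.2.1)).foldl max c, (t.map (·.2.2)).foldl max d) := by
  induction t generalizing a b c d with
  | nil => rfl
  | cons x t ih =>
    simp only [List.foldl_cons, List.map_cons, pvU]
    exact ih _ _ _ _

lemma bbox_of_ne_nil (fl : List (Int × Int × Int)) (h : fl ≠ []) :
    fl.foldl (fun o x => some (pvU o x.2.1 x.2.2)) none =
      some (pyMin (fl.map (·.2.1)), pyMin (fl.map (·.2.2)),
            pyMax (fl.map (·.2.1)), pyMax (fl.map (·.2.2))) := by
  cases fl with
  | nil => exact absurd rfl h
  | cons c t =>
    simp only [List.foldl_cons, List.map_cons, pvU, pyMin, pyMax]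
    exact quad_foldl t _ _ _ _

lemma keysA (n m : Int) (maze : List (List Int)) :
    ((pvNz n m maze).foldl pvStepA PySem.Dict.empty).keys =
      PySem.Set.ofList ((pvNz n m maze).map (·.1)) := by
  have h := PySem.Dict.keys_foldl_insert_key (l := pvNz n m maze) (key := (·.1))
    (f := fun d c => pvU (d.get? c.1) c.2.1 c.2.2) (d := PySem.Dict.empty)
  simpa [pvStepA, PySem.Set.update_nil_left] using h

lemma nodupA (n m : Int) (maze : List (List Int)) :
    ((pvNz n m maze).foldl pvStepA PySem.Dict.empty).keys.Nodup := by
  have h := PySem.Dict.nodup_keys_foldl_insert_key (pvNz n m maze) (·.1)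
    (fun d c => pvU (d.get? c.1) c.2.1 c.2.2) PySem.Dict.empty (by simp)
  simpa [pvStepA] using h

-- B's pass-1 fold: the seen-set and the label list stay equal (Set.add appends when absent)
lemma pairB_eq (l : List Int) (s : PySem.Set Int) :
    l.foldl (fun (sl : PySem.Set Int × List Int) v =>
        if v ≠ 0 ∧ ¬ PySem.Set.contains sl.1 v then (PySem.Set.add sl.1 v, sl.2 ++ [v])
        else sl) (s, s) =
      ((l.filter (fun v => decide (v ≠ 0))).foldl PySem.Set.add s,
       (l.filter (fun v => decide (v ≠ 0))).foldl PySem.Set.add s) := by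
  induction l generalizing s with
  | nil => rfl
  | cons v t ih =>
    by_cases hv : v = 0
    · simpa [hv] using ih s
    · by_cases hc : v ∈ s
      · have ha : PySem.Set.add s v = s := by simp [PySem.Set.add, PySem.Set.contains, hc]
        simpa [hv, hc, PySem.Set.contains, ha] using ih s
      · have ha : PySem.Set.add s v = s ++ [v] := by
          simp [PySem.Set.add, PySem.Set.contains, hc]
        simpa [hv, hc, PySem.Set.contains, ha] using ih (s ++ [v])

lemma labelsB_eq (n m : Int) (maze : List (List Int)) :
    ((PySem.List.pyRange 0 n 1).foldl (fun sl i =>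
      (PySem.List.pyRange 0 m 1).foldl (fun (sl : PySem.Set Int × List Int) j =>
        let v := pvCell maze i j
        if v ≠ 0 ∧ ¬ PySem.Set.contains sl.1 v then (PySem.Set.add sl.1 v, sl.2 ++ [v])
        else sl) sl) (PySem.Set.empty, [])).2 =
      PySem.Set.ofList ((pvNz n m maze).map (·.1)) := by
  have hfold : ((PySem.List.pyRange 0 n 1).foldl (fun sl i =>
      (PySem.List.pyRange 0 m 1).foldl (fun (sl : PySem.Set Int × List Int) j =>
        let v := pvCell maze i j
        if v ≠ 0 ∧ ¬ PySem.Set.contains sl.1 v then (PySem.Set.add sl.1 v, sl.2 ++ [v])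
        else sl) sl) (PySem.Set.empty, [])) =
      ((pvCells n m maze).map (·.1)).foldl (fun (sl : PySem.Set Int × List Int) v =>
        if v ≠ 0 ∧ ¬ PySem.Set.contains sl.1 v then (PySem.Set.add sl.1 v, sl.2 ++ [v])
        else sl) (PySem.Set.empty, []) := by
    rw [List.foldl_map, pvCells, List.foldl_flatMap]
    simp only [List.foldl_map]
  rw [hfold]
  have hp := pairB_eq ((pvCells n m maze).map (·.1)) PySem.Set.empty
  have hemp : (PySem.Set.empty : PySem.Set Int) = ([] : List Int) := rfl
  rw [hemp] at hp ⊢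
  rw [hp]
  have hfl : ((pvCells n m maze).map (·.1)).filter (fun v => decide (v ≠ 0)) =
      (pvNz n m maze).map (·.1) := by
    rw [pvNz, List.filter_map]
    rfl
  rw [hfl, PySem.Set.ofList_eq_foldl]

-- the two comprehensions of B, characterised through pvNz (for a nonzero label v)
lemma rowsB_eq (n m : Int) (maze : List (List Int)) (v : Int) (hv : v ≠ 0) :
    ((PySem.List.pyRange 0 n 1).flatMap (fun i =>
      ((PySem.List.pyRange 0 m 1).filter (fun j => pvCell maze i j == v)).map (fun _ => i))) =
      ((pvNz n m maze).filter (fun c => c.1 == v)).map (·.2.1) := by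
  rw [pvNz, List.filter_filter]
  have hcong : (pvCells n m maze).filter (fun c => c.1 == v && decide (c.1 ≠ 0)) =
      (pvCells n m maze).filter (fun c => c.1 == v) := by
    apply List.filter_congr
    intro c _
    by_cases h : c.1 = v
    · simp [h, hv]
    · simp [h]
  rw [hcong, pvCells, List.filter_flatMap, List.map_flatMap]
  apply List.flatMap_congr
  intro i _
  rw [List.filter_map, List.map_map]
  rfl

lemma colsB_eq (n m : Int) (maze : List (List Int)) (v : Int) (hv : v ≠ 0) :
    ((PySem.List.pyRange 0 n 1).flatMap (fun i =>
      (PySem.List.pyRange 0 m 1).filter (fun j => pvCell maze i j == v))) =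
      ((pvNz n m maze).filter (fun c => c.1 == v)).map (·.2.2) := by
  rw [pvNz, List.filter_filter]
  have hcong : (pvCells n m maze).filter (fun c => c.1 == v && decide (c.1 ≠ 0)) =
      (pvCells n m maze).filter (fun c => c.1 == v) := by
    apply List.filter_congr
    intro c _
    by_cases h : c.1 = v
    · simp [h, hv]
    · simp [h]
  rw [hcong, pvCells, List.filter_flatMap, List.map_flatMap]
  apply List.flatMap_congr
  intro i _
  rw [List.filter_map, List.map_map]
  simp [Function.comp_def]

lemma main_eq (n m : Int) (maze : List (List Int)) : func n m maze = func_alt n m maze := by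
  unfold func func_alt
  rw [dictA_eq]
  simp only []
  rw [PySem.Dict.items_eq_map_keys _ (nodupA n m maze) ((0 : Int), (0 : Int), (0 : Int), (0 : Int)),
      List.foldl_map, keysA, labelsB_eq]
  apply PySem.List.foldl_congr_mem'
  intro k hk acc
  obtain ⟨c, hc, hck⟩ := List.mem_map.mp ((PySem.Set.mem_ofList _ _).mp hk)
  have hk0 : k ≠ 0 := by
    have := List.of_mem_filter hc
    simpa [hck] using this
  have hfl : (pvNz n m maze).filter (fun c => c.1 == k) ≠ [] :=
    List.ne_nil_of_mem (List.mem_filter.mpr ⟨hc, by simp [hck]⟩)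
  have hA : ((pvNz n m maze).foldl pvStepA PySem.Dict.empty).getD k (0, 0, 0, 0) =
      (pyMin (((pvNz n m maze).filter (fun c => c.1 == k)).map (·.2.1)),
       pyMin (((pvNz n m maze).filter (fun c => c.1 == k)).map (·.2.2)),
       pyMax (((pvNz n m maze).filter (fun c => c.1 == k)).map (·.2.1)),
       pyMax (((pvNz n m maze).filter (fun c => c.1 == k)).map (·.2.2))) := by
    rw [PySem.Dict.getD_eq_get?_getD, get?_foldl_stepA, PySem.Dict.get?_empty,
        bbox_of_ne_nil _ hfl]
    rfl
  simp only [hA, rowsB_eq n m maze k hk0, colsB_eq n m maze k hk0]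

-- ===== VERDICT (by name: the statement is the Claim_ definition above) =====
theorem func_spec : Claim_equal_func := by
  intro n m maze _ _
  unfold Spec_func
  exact main_eq n m maze
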